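-- pv_equiv track=rewrite | github.com/LLUDA/icc-analysis | icc_pure_4h_1h.py | get_swings
-- ===== SOURCE A (Python) =====
-- def get_swings(data, is_high=True, lookback=5):
--     """Find swing highs/lows"""
--     swings = []
--     for i in range(lookback, len(data) - lookback):
--         if is_high:
--             if data[i] == max(data[i - lookback : i + lookback + 1]):
--                 swings.append((i, data[i]))
--         else:
--             if data[i] == min(data[i - lookback : i + lookback + 1]):
--                 swings.append((i, data[i]))
--     return swings
-- ===== SOURCE B (Python) =====
-- def get_swings(data, is_high=True, lookback=5):
--     """Find swing highs/lows via a single-pass monotonic-deque sliding-window extremum."""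
--     n = len(data)
--     w = 2 * lookback + 1
--     if lookback < 0 or n < w:
--         return []
--     sign = 1 if is_high else -1
--     dq = []      # (index, sign*value) pairs; values strictly decreasing from head on
--     head = 0     # slots before head are dead (evicted from the window front)
--     swings = []
--     for j in range(n):
--         x = sign * data[j]
--         while len(dq) > head and dq[-1][1] <= x:
--             dq.pop()
--         dq.append((j, x))
--         if dq[head][0] <= j - w:
--             head += 1
--         i = j - lookback
--         if i >= lookback and sign * data[i] == dq[head][1]:
--             swings.append((i, data[i]))
--     return swings
-- ===== Notes on version B (the rewrite author's own statement) =====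
-- stated objective: alternative
-- what changed: Replaces A's per-index max()/min() rescan of each (2*lookback+1)-wide window with a single pass that maintains a monotonic deque of (index,value) pairs and compares each point to the deque front.
import Mathlib
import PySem

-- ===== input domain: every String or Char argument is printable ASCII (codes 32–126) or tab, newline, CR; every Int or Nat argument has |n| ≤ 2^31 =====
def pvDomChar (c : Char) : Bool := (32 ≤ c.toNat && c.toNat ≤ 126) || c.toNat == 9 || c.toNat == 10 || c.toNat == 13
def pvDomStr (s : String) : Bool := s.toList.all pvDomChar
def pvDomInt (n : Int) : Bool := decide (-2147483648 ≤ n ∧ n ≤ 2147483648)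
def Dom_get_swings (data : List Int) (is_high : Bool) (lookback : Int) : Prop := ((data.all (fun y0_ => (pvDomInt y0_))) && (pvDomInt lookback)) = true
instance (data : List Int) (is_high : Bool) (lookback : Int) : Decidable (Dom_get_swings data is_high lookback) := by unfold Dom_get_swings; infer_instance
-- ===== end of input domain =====

-- B: a one-pass monotonic-deque sliding-window extremum instead of A's per-index window
-- max/min rescan (objective: alternative; intended as faster, but a timing run did not
-- confirm that at the largest generated sizes, so no speed is claimed).

-- ===== PORT A =====
-- 'data[i] == max(...)'/'== min(...)' is ported as equality of the two Options; inside
-- Pre_get_swings every index is in range and every slice nonempty, so both sides are 'some'.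
def get_swings (data : List Int) (is_high : Bool) (lookback : Int) : List (Int × Int) :=
  (PySem.List.pyRange lookback ((data.length : Int) - lookback)).foldl
    (fun swings i =>
      if is_high then
        if PySem.List.pyGet? data i =
            PySem.List.max? (PySem.List.slice data (some (i - lookback)) (some (i + lookback + 1))) (fun y => y)
        then swings ++ [(i, (PySem.List.pyGet? data i).getD 0)]
        else swings
      else
        if PySem.List.pyGet? data i =
            PySem.List.min? (PySem.List.slice data (some (i - lookback)) (some (i + lookback + 1))) (fun y => y)
        then swings ++ [(i, (PySem.List.pyGet? data i).getD 0)]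
        else swings)
    []

-- ===== PORT B =====
-- 'while len(dq) > head and dq[-1][1] <= x: dq.pop()' — dq[-1] on the nonempty list is getLast?,
-- list.pop() is dropLast; exact step-for-step rendering of Source B's inner while loop.
def gsPopLoop (x : Int) (head : Int) (dq : List (Int × Int)) : List (Int × Int) :=
  if head < (dq.length : Int) then
    match h : dq.getLast? with
    | some p => if p.2 ≤ x then gsPopLoop x head dq.dropLast else dq
    | none => dq
  else dq
termination_by dq.length
decreasing_by
  have hne : dq ≠ [] := by intro he; subst he; simp at h
  have : dq.length - 1 < dq.length := Nat.sub_lt (List.length_pos_iff.mpr hne) one_pos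
  simpa [List.length_dropLast] using this

-- dq[head] / dq[head'] are in range whenever Source B reads them; the '.getD' default is never used there.
def get_swings_alt (data : List Int) (is_high : Bool) (lookback : Int) : List (Int × Int) :=
  let n : Int := (data.length : Int)
  let w : Int := 2 * lookback + 1
  if lookback < 0 ∨ n < w then []
  else
    let sign : Int := if is_high then 1 else -1
    let st := (PySem.List.pyRange 0 n).foldl
      (fun (st : List (Int × Int) × Int × List (Int × Int)) j =>
        let x := sign * ((PySem.List.pyGet? data j).getD 0)
        let dq := gsPopLoop x st.2.1 st.1 ++ [(j, x)]
        let head := if ((PySem.List.pyGet? dq st.2.1).getD (0, 0)).1 ≤ j - w then st.2.1 + 1 else st.2.1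
        let i := j - lookback
        let v := (PySem.List.pyGet? data i).getD 0
        let swings := if lookback ≤ i ∧ sign * v = ((PySem.List.pyGet? dq head).getD (0, 0)).2
          then st.2.2 ++ [(i, v)] else st.2.2
        (dq, head, swings))
      ([], 0, [])
    st.2.2

-- ===== PRECONDITION & SPEC =====
-- Pre_ excludes exactly lookback < 0: there the Python A always raises (IndexError on an
-- out-of-range index, or ValueError from max()/min() of an empty slice) and never returns.
def Pre_get_swings (data : List Int) (is_high : Bool) (lookback : Int) : Prop := 0 ≤ lookback
instance (data : List Int) (is_high : Bool) (lookback : Int) : Decidable (Pre_get_swings data is_high lookback) := by unfold Pre_get_swings; infer_instance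

def pvWitness_get_swings : List Int × Bool × Int := ([0, 2, 1], true, 1)


def Spec_get_swings (data : List Int) (is_high : Bool) (lookback : Int) (out : List (Int × Int)) : Prop := out = get_swings_alt data is_high lookback
instance (data : List Int) (is_high : Bool) (lookback : Int) (out : List (Int × Int)) : Decidable (Spec_get_swings data is_high lookback out) := by unfold Spec_get_swings; infer_instance

-- ===== CLAIM (what is proved, stated in full; the proofs are below) =====
def Claim_equal_get_swings : Prop := ∀ (data : List Int) (is_high : Bool) (lookback : Int), Dom_get_swings data is_high lookback → Pre_get_swings data is_high lookback → Spec_get_swings data is_high lookback (get_swings data is_high lookback)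

-- ===== LEMMAS AND PROOFS =====

-- raw data value at Int index (total form both ports read inside Pre_)
def gsDVal (data : List Int) (k : Int) : Int := (PySem.List.pyGet? data k).getD 0
-- signed value: the quantity Source B's deque orders by
def gsVal (sign : Int) (data : List Int) (k : Int) : Int := sign * gsDVal data k

-- candidate deque after pops and the append, newest first (abstract view of dq[head:] reversed)
def gsCand (v : Int → Int) (j : Int) (l : List (Int × Int)) : List (Int × Int) :=
  (j, v j) :: l.dropWhile (fun p => decide (p.2 ≤ v j))

-- one abstract step: pops, append, then possible front eviction (= dropping the last element here)
def gsStep (v : Int → Int) (w : Int) (j : Int) (l : List (Int × Int)) : List (Int × Int) :=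
  if ((gsCand v j l).getLastD (0, 0)).1 ≤ j - w then (gsCand v j l).dropLast else gsCand v j l

-- abstract active deque after iterations 0..j-1
def gsAct (v : Int → Int) (w : Int) : Nat → List (Int × Int)
  | 0 => []
  | j + 1 => gsStep v w (j : Int) (gsAct v w j)

-- evicted (dead) prefix of the concrete dq after iterations 0..j-1
def gsDead (v : Int → Int) (w : Int) : Nat → List (Int × Int)
  | 0 => []
  | j + 1 =>
    gsDead v w j ++
      (if ((gsCand v (j : Int) (gsAct v w j)).getLastD (0, 0)).1 ≤ (j : Int) - w
       then [(gsCand v (j : Int) (gsAct v w j)).getLastD (0, 0)] else [])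

-- swings accumulated after iterations 0..j-1
def gsSw (v : Int → Int) (data : List Int) (lb w : Int) : Nat → List (Int × Int)
  | 0 => []
  | j + 1 =>
    gsSw v data lb w j ++
      (if lb ≤ (j : Int) - lb ∧ v ((j : Int) - lb) = ((gsAct v w (j + 1)).getLastD (0, 0)).2
       then [((j : Int) - lb, gsDVal data ((j : Int) - lb))] else [])

-- deque invariant after iteration j
def gsInv (v : Int → Int) (w : Int) (j : Nat) (l : List (Int × Int)) : Prop :=
  (∀ p ∈ l, p.2 = v p.1 ∧ (j : Int) + 1 - w ≤ p.1 ∧ 0 ≤ p.1 ∧ p.1 ≤ (j : Int)) ∧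
  l.Pairwise (fun a b => b.1 < a.1 ∧ a.2 < b.2) ∧
  (∀ k : Int, (j : Int) + 1 - w ≤ k → 0 ≤ k → k ≤ (j : Int) → ∃ p ∈ l, k ≤ p.1 ∧ v k ≤ p.2)

-- the swing condition both programs decide, phrased over the window's index range
def gsCond (sign : Int) (data : List Int) (lb i : Int) : Bool :=
  (PySem.List.pyRange (i - lb) (i + lb + 1)).all (fun k => decide (gsVal sign data k ≤ gsVal sign data i))

-- the common normal form of both results
def gsSpecList (sign : Int) (data : List Int) (lb bound : Int) : List (Int × Int) :=
  ((PySem.List.pyRange lb (bound - lb)).filter (gsCond sign data lb)).map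
    (fun i => (i, gsDVal data i))

lemma gsRange_nil {a b : Int} (h : b ≤ a) : PySem.List.pyRange a b = [] := by
  rw [List.eq_nil_iff_forall_not_mem]
  intro x hx
  rw [PySem.List.mem_pyRange_one] at hx
  omega

-- the last element of a pairwise-decreasing-index deque has minimal index and maximal value
lemma gsLast_le (m : List (Int × Int))
    (hp : m.Pairwise (fun a b => b.1 < a.1 ∧ a.2 < b.2)) :
    ∀ p ∈ m, (m.getLastD (0, 0)).1 ≤ p.1 ∧ p.2 ≤ (m.getLastD (0, 0)).2 := by
  intro p hp'
  rcases List.eq_nil_or_concat m with rfl | ⟨m', g, rfl⟩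
  · simp at hp'
  · simp only [List.concat_eq_append] at hp hp' ⊢
    rw [List.getLastD_concat]
    rcases List.mem_append.mp hp' with h | h
    · have := (List.pairwise_append.mp hp).2.2 p h g (by simp)
      exact ⟨le_of_lt this.1, le_of_lt this.2⟩
    · simp at h; subst h; exact ⟨le_refl _, le_refl _⟩

lemma gsLast_lt (m : List (Int × Int))
    (hp : m.Pairwise (fun a b => b.1 < a.1 ∧ a.2 < b.2)) :
    ∀ p ∈ m.dropLast, (m.getLastD (0, 0)).1 < p.1 ∧ p.2 < (m.getLastD (0, 0)).2 := by
  intro p hp'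
  rcases List.eq_nil_or_concat m with rfl | ⟨m', g, rfl⟩
  · simp at hp'
  · simp only [List.concat_eq_append] at hp hp' ⊢
    rw [List.getLastD_concat]
    rw [List.dropLast_concat] at hp'
    exact (List.pairwise_append.mp hp).2.2 p hp' g (by simp)

lemma gsReverse_split (m : List (Int × Int)) (h : m ≠ []) :
    m.reverse = m.getLastD (0, 0) :: m.dropLast.reverse := by
  conv_lhs => rw [← List.dropLast_concat_getLast h]
  rw [List.reverse_append, List.getLastD_eq_getLast?, List.getLast?_eq_some_getLast h]
  simp

lemma gsPop_sim (x : Int) (dead : List (Int × Int)) :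
    ∀ l : List (Int × Int),
      gsPopLoop x (dead.length : Int) (dead ++ l.reverse) =
        dead ++ (l.dropWhile (fun p => decide (p.2 ≤ x))).reverse := by
  intro l
  induction l with
  | nil => rw [gsPopLoop]; simp
  | cons p t ih =>
    rw [gsPopLoop]
    have hlen : (dead.length : Int) < (((dead ++ (p :: t).reverse)).length : Int) := by
      have h1 : (dead ++ (p :: t).reverse).length = dead.length + (t.length + 1) := by simp
      omega
    rw [if_pos hlen]
    have hlast : (dead ++ (p :: t).reverse).getLast? = some p := by
      rw [List.reverse_cons, ← List.append_assoc]
      exact List.getLast?_concat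
    split
    next q heq =>
      rw [hlast] at heq
      obtain rfl : p = q := Option.some.inj heq
      by_cases hle : p.2 ≤ x
      · rw [if_pos hle]
        have hdrop : (dead ++ (p :: t).reverse).dropLast = dead ++ t.reverse := by
          rw [List.reverse_cons, ← List.append_assoc, List.dropLast_concat]
        rw [hdrop, ih, List.dropWhile_cons]
        simp [hle]
      · rw [if_neg hle, List.dropWhile_cons]
        simp [hle]
    next heq => rw [hlast] at heq; cases heq

lemma gsInv_base (v : Int → Int) (w : Int) (hw : 1 ≤ w) : gsInv v w 0 (gsAct v w 1) := by
  have hact : gsAct v w 1 = [((0 : Int), v 0)] := by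
    show gsStep v w ((0 : Nat) : Int) (gsAct v w 0) = _
    rw [gsStep]
    have : ¬ (((gsCand v ((0 : Nat) : Int) (gsAct v w 0)).getLastD (0, 0)).1 ≤ ((0 : Nat) : Int) - w) := by
      simp [gsCand, gsAct, List.dropWhile]; omega
    rw [if_neg this]
    simp [gsCand, gsAct, List.dropWhile]
  rw [hact]
  refine ⟨?_, ?_, ?_⟩
  · intro p hp; simp at hp; subst hp; simp; omega
  · simp
  · intro k h1 h2 h3
    refine ⟨((0 : Int), v 0), by simp, by omega, ?_⟩
    simp
    have : k = 0 := by omega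
    simp [this]

lemma gsDropWhile_head_false {α : Type} (pred : α → Bool) :
    ∀ (l : List α) (q : α) (t : List α), l.dropWhile pred = q :: t → pred q = false := by
  intro l
  induction l with
  | nil => intro q t h; simp [List.dropWhile] at h
  | cons a l ih =>
    intro q t h
    rw [List.dropWhile_cons] at h
    by_cases hp : pred a = true
    · exact ih q t (by simpa [hp] using h)
    · simp only [hp, if_false] at h
      cases h
      simpa using hp

lemma gsInv_step (v : Int → Int) (w : Int) (hw : 1 ≤ w) (j : Nat) (l : List (Int × Int))
    (h : gsInv v w j l) : gsInv v w (j + 1) (gsStep v w ((j : Int) + 1) l) := by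
  obtain ⟨h3, h4, h5⟩ := h
  have hJ : ((j + 1 : Nat) : Int) = (j : Int) + 1 := by push_cast; ring
  set J : Int := (j : Int) + 1 with hJdef
  set l' : List (Int × Int) := l.dropWhile (fun p => decide (p.2 ≤ v J)) with hl'
  have hcand : gsCand v J l = (J, v J) :: l' := rfl
  set a : List (Int × Int) := (J, v J) :: l' with hadef
  have hane : a ≠ [] := by simp [hadef]
  have hsubl : ∀ p ∈ l', p ∈ l := fun p hp => (List.dropWhile_sublist _).subset hp
  have h4' : l'.Pairwise (fun a b => b.1 < a.1 ∧ a.2 < b.2) :=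
    h4.sublist (List.dropWhile_sublist _)
  have hgt : ∀ p ∈ l', v J < p.2 := by
    intro p hp
    rcases hcons : l' with _ | ⟨q, t⟩
    · rw [hcons] at hp; cases hp
    · have hq : ¬ (q.2 ≤ v J) := by
        have := gsDropWhile_head_false (fun p => decide (p.2 ≤ v J)) l q t
          (by rw [← hl']; exact hcons)
        simpa using this
      rw [hcons] at h4' hp
      rcases List.mem_cons.mp hp with rfl | hp'
      · omega
      · have := (List.pairwise_cons.mp h4').1 p hp'
        omega
  have h4a : a.Pairwise (fun a b => b.1 < a.1 ∧ a.2 < b.2) := by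
    rw [hadef]
    refine List.pairwise_cons.mpr ⟨fun b hb => ⟨?_, hgt b hb⟩, h4'⟩
    have := (h3 b (hsubl b hb)).2.2.2
    omega
  have hmemA : ∀ p ∈ a, p.2 = v p.1 ∧ J - w ≤ p.1 ∧ 0 ≤ p.1 ∧ p.1 ≤ J := by
    intro p hp
    rcases List.mem_cons.mp hp with rfl | hp'
    · refine ⟨rfl, by omega, by omega, le_refl _⟩
    · obtain ⟨hv, hlb, hnn, hub⟩ := h3 p (hsubl p hp')
      exact ⟨hv, by omega, hnn, by omega⟩
  set g : Int × Int := a.getLastD (0, 0) with hg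
  have hgmem : g ∈ a := by
    rw [hg, List.getLastD_eq_getLast?, List.getLast?_eq_some_getLast hane, Option.getD_some]
    exact List.getLast_mem hane
  have hgmin : ∀ p ∈ a, g.1 ≤ p.1 ∧ p.2 ≤ g.2 := gsLast_le a h4a
  have hwit : ∀ k : Int, J + 1 - w ≤ k → 0 ≤ k → k ≤ J →
      ∃ p ∈ a, k ≤ p.1 ∧ v k ≤ p.2 := by
    intro k hk1 hk2 hk3
    by_cases hkJ : k = J
    · exact ⟨(J, v J), List.mem_cons_self, by omega, le_of_eq (by rw [hkJ])⟩
    · obtain ⟨p, hpl, hkp, hvp⟩ := h5 k (by omega) hk2 (by omega)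
      have hior : p ∈ l.takeWhile (fun p => decide (p.2 ≤ v J)) ∨ p ∈ l' := by
        rw [hl']
        exact List.mem_append.mp (by
          rw [List.takeWhile_append_dropWhile]; exact hpl)
      rcases hior with htk | hdr
      · have hpx : p.2 ≤ v J := by simpa using List.mem_takeWhile_imp htk
        exact ⟨(J, v J), List.mem_cons_self, by omega, le_trans hvp hpx⟩
      · exact ⟨p, List.mem_cons_of_mem _ hdr, hkp, hvp⟩
  have hstep : gsStep v w J l = if g.1 ≤ J - w then a.dropLast else a := by
    rw [gsStep]; rfl
  by_cases hev : g.1 ≤ J - w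
  · -- eviction: the front fell out of the window
    rw [hstep, if_pos hev]
    have hgJ : g.1 < J := by omega
    have hsplita : a.dropLast ++ [a.getLast hane] = a := List.dropLast_concat_getLast hane
    have hglast : g = a.getLast hane := by
      rw [hg, List.getLastD_eq_getLast?, List.getLast?_eq_some_getLast hane, Option.getD_some]
    have hmemdl : ∀ p ∈ a, p.1 ≠ g.1 → p ∈ a.dropLast := by
      intro p hpa hpg
      rcases List.mem_append.mp (by rw [hsplita]; exact hpa) with h | h
      · exact h
      · simp at h; rw [h, ← hglast] at hpg; exact absurd rfl hpg
    refine ⟨?_, h4a.sublist (List.dropLast_sublist _), ?_⟩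
    · intro p hp
      have hpa : p ∈ a := (List.dropLast_sublist _).subset hp
      obtain ⟨hv, _, hnn, hub⟩ := hmemA p hpa
      have := (gsLast_lt a h4a p hp).1
      have hglb := (hmemA g hgmem).2.1
      rw [hg] at hglb
      exact ⟨hv, by omega, hnn, by omega⟩
    · intro k hk1 hk2 hk3
      obtain ⟨p, hpa, hkp, hvp⟩ := hwit k (by omega) hk2 (by omega)
      refine ⟨p, hmemdl p hpa ?_, hkp, hvp⟩
      omega
  · rw [hstep, if_neg hev]
    refine ⟨?_, h4a, ?_⟩
    · intro p hp
      obtain ⟨hv, _, hnn, hub⟩ := hmemA p hp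
      have := (hgmin p hp).1
      exact ⟨hv, by omega, hnn, by omega⟩
    · intro k hk1 hk2 hk3
      exact hwit k (by omega) hk2 (by omega)

lemma gsInv_act (v : Int → Int) (w : Int) (hw : 1 ≤ w) (j : Nat) :
    gsInv v w j (gsAct v w (j + 1)) := by
  induction j with
  | zero => exact gsInv_base v w hw
  | succ j ih =>
    have h2 : ((j + 1 : Nat) : Int) = (j : Int) + 1 := by push_cast; ring
    show gsInv v w (j + 1) (gsStep v w ((j + 1 : Nat) : Int) (gsAct v w (j + 1)))
    rw [h2]
    exact gsInv_step v w hw j _ ih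

-- the front of the deque carries the window maximum
lemma gsFront (v : Int → Int) (w : Int) (j : Nat) (l : List (Int × Int)) (hw : 1 ≤ w)
    (h : gsInv v w j l) :
    ((l.getLastD (0, 0)).2 = v (l.getLastD (0, 0)).1) ∧
    ((j : Int) + 1 - w ≤ (l.getLastD (0, 0)).1 ∧ 0 ≤ (l.getLastD (0, 0)).1 ∧ (l.getLastD (0, 0)).1 ≤ (j : Int)) ∧
    (∀ k : Int, (j : Int) + 1 - w ≤ k → 0 ≤ k → k ≤ (j : Int) → v k ≤ (l.getLastD (0, 0)).2) := by
  obtain ⟨h3, h4, h5⟩ := h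
  have hne : l ≠ [] := by
    obtain ⟨p, hp, -⟩ := h5 j (by omega) (by omega) (by omega)
    intro he; rw [he] at hp; cases hp
  have hgmem : l.getLastD (0, 0) ∈ l := by
    rw [List.getLastD_eq_getLast?, List.getLast?_eq_some_getLast hne, Option.getD_some]
    exact List.getLast_mem hne
  obtain ⟨hv, hlb, hnn, hub⟩ := h3 _ hgmem
  refine ⟨hv, ⟨hlb, hnn, hub⟩, ?_⟩
  intro k hk1 hk2 hk3
  obtain ⟨p, hp, hkp, hvk⟩ := h5 k hk1 hk2 hk3
  have := (gsLast_le l h4 p hp).2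
  omega

-- B's emission test at iteration j agrees with the window-wide condition at i = j - lb
lemma gsEmit_iff (sign : Int) (data : List Int) (lb : Int) (hlb : 0 ≤ lb) (j : Nat)
    (hj : lb ≤ (j : Int) - lb) :
    (gsVal sign data ((j : Int) - lb) = ((gsAct (gsVal sign data) (2 * lb + 1) (j + 1)).getLastD (0, 0)).2) ↔
      gsCond sign data lb ((j : Int) - lb) = true := by
  have hw : (1 : Int) ≤ 2 * lb + 1 := by omega
  have hinv := gsInv_act (gsVal sign data) (2 * lb + 1) hw j
  obtain ⟨hfv, ⟨hflb, hfnn, hfub⟩, hmax⟩ :=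
    gsFront (gsVal sign data) (2 * lb + 1) j (gsAct (gsVal sign data) (2 * lb + 1) (j + 1)) hw hinv
  constructor
  · intro he
    rw [gsCond, List.all_eq_true]
    intro k hk
    rw [PySem.List.mem_pyRange_one] at hk
    have := hmax k (by omega) (by omega) (by omega)
    rw [← he] at this
    simpa using this
  · intro hall
    rw [gsCond, List.all_eq_true] at hall
    have h1 : gsVal sign data ((gsAct (gsVal sign data) (2 * lb + 1) (j + 1)).getLastD (0, 0)).1 ≤
        gsVal sign data ((j : Int) - lb) := by
      have := hall ((gsAct (gsVal sign data) (2 * lb + 1) (j + 1)).getLastD (0, 0)).1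
        (by rw [PySem.List.mem_pyRange_one]; omega)
      simpa using this
    have h2 : gsVal sign data ((j : Int) - lb) ≤
        ((gsAct (gsVal sign data) (2 * lb + 1) (j + 1)).getLastD (0, 0)).2 :=
      hmax _ (by omega) (by omega) (by omega)
    rw [hfv]
    omega

lemma gsSw_eq (sign : Int) (data : List Int) (lb : Int) (hlb : 0 ≤ lb) (jn : Nat) :
    gsSw (gsVal sign data) data lb (2 * lb + 1) jn = gsSpecList sign data lb (jn : Int) := by
  induction jn with
  | zero =>
    rw [gsSw, gsSpecList, gsRange_nil (by omega)]
    simp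
  | succ j ih =>
    rw [gsSw, ih, gsSpecList, gsSpecList]
    by_cases hj : lb ≤ (j : Int) - lb
    · have hr : PySem.List.pyRange lb (((j + 1 : Nat) : Int) - lb) =
          PySem.List.pyRange lb ((j : Int) - lb) ++ [(j : Int) - lb] := by
        have hc : ((j + 1 : Nat) : Int) - lb = ((j : Int) - lb) + 1 := by push_cast; ring
        rw [hc, PySem.List.pyRange_one_succ_right hj]
      rw [hr, List.filter_append, List.map_append]
      congr 1
      have hemit := gsEmit_iff sign data lb hlb j hj
      by_cases hc : gsCond sign data lb ((j : Int) - lb) = true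
      · rw [if_pos ⟨hj, hemit.mpr hc⟩]
        simp [List.filter, hc]
      · rw [if_neg (by intro hcontra; exact hc (hemit.mp hcontra.2))]
        simp [List.filter, hc]
    · have h1 : PySem.List.pyRange lb (((j + 1 : Nat) : Int) - lb) = [] := gsRange_nil (by omega)
      have h2 : PySem.List.pyRange lb ((j : Int) - lb) = [] := gsRange_nil (by omega)
      rw [if_neg (by intro hcontra; exact hj hcontra.1), h1, h2]
      simp

lemma gsSim (data : List Int) (sign : Int) (lb w : Int) (jn : Nat) :
    (PySem.List.pyRange 0 (jn : Int)).foldl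
      (fun (st : List (Int × Int) × Int × List (Int × Int)) j =>
        let x := sign * ((PySem.List.pyGet? data j).getD 0)
        let dq := gsPopLoop x st.2.1 st.1 ++ [(j, x)]
        let head := if ((PySem.List.pyGet? dq st.2.1).getD (0, 0)).1 ≤ j - w then st.2.1 + 1 else st.2.1
        let i := j - lb
        let v := (PySem.List.pyGet? data i).getD 0
        let swings := if lb ≤ i ∧ sign * v = ((PySem.List.pyGet? dq head).getD (0, 0)).2
          then st.2.2 ++ [(i, v)] else st.2.2
        (dq, head, swings))
      ([], 0, []) =
    (gsDead (gsVal sign data) w jn ++ (gsAct (gsVal sign data) w jn).reverse,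
     ((gsDead (gsVal sign data) w jn).length : Int),
     gsSw (gsVal sign data) data lb w jn) := by
  induction jn with
  | zero =>
    rw [show ((0 : Nat) : Int) = (0 : Int) by simp, gsRange_nil (le_refl 0)]
    simp [gsDead, gsAct, gsSw]
  | succ jn ih =>
    rw [show ((jn + 1 : Nat) : Int) = ((jn : Int) + 1) by push_cast; ring,
      PySem.List.pyRange_one_succ_right (Int.natCast_nonneg jn), List.foldl_append, ih]
    simp only [List.foldl_cons, List.foldl_nil]
    have hx : sign * ((PySem.List.pyGet? data (jn : Int)).getD 0) = gsVal sign data (jn : Int) := rfl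
    set x := gsVal sign data (jn : Int) with hxd
    set dead := gsDead (gsVal sign data) w jn with hdeadd
    set act := gsAct (gsVal sign data) w jn with hactd
    set l' : List (Int × Int) := act.dropWhile (fun p => decide (p.2 ≤ x)) with hl'd
    set a : List (Int × Int) := ((jn : Int), x) :: l' with had
    have hane : a ≠ [] := by simp [had]
    have hpop : gsPopLoop x (dead.length : Int) (dead ++ act.reverse) = dead ++ l'.reverse :=
      gsPop_sim x dead act
    have hdq : dead ++ l'.reverse ++ [((jn : Int), x)] = dead ++ a.reverse := by
      rw [had, List.reverse_cons, List.append_assoc]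
    have hfront : ∀ (m : List (Int × Int)),
        (PySem.List.pyGet? (m ++ a.reverse) (m.length : Int)).getD (0, 0) = a.getLastD (0, 0) := by
      intro m
      have h0 : PySem.List.pyGet? (m ++ a.reverse) ((m.length : Int) + ((0 : Nat) : Int)) =
          (a.reverse)[0]? := PySem.List.pyGet?_append_right m a.reverse 0
      rw [show (m.length : Int) + ((0 : Nat) : Int) = (m.length : Int) by simp] at h0
      rw [h0, ← List.head?_eq_getElem?, List.head?_reverse, List.getLastD_eq_getLast?]
    have hcand : gsCand (gsVal sign data) (jn : Int) act = a := rfl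
    have hact1 : gsAct (gsVal sign data) w (jn + 1) =
        if (a.getLastD (0, 0)).1 ≤ (jn : Int) - w then a.dropLast else a := by
      show gsStep (gsVal sign data) w ((jn : Nat) : Int) act = _
      rw [gsStep, hcand]
    have hdead1 : gsDead (gsVal sign data) w (jn + 1) =
        dead ++ (if (a.getLastD (0, 0)).1 ≤ (jn : Int) - w then [a.getLastD (0, 0)] else []) := by
      rw [gsDead, hcand, ← hdeadd]
    have hsw1 : gsSw (gsVal sign data) data lb w (jn + 1) =
        gsSw (gsVal sign data) data lb w jn ++
          (if lb ≤ (jn : Int) - lb ∧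
              gsVal sign data ((jn : Int) - lb) = ((gsAct (gsVal sign data) w (jn + 1)).getLastD (0, 0)).2
           then [((jn : Int) - lb, gsDVal data ((jn : Int) - lb))] else []) := by
      rw [gsSw]
    by_cases hev : (a.getLastD (0, 0)).1 ≤ (jn : Int) - w
    · -- eviction branch
      have hrs : a.reverse = a.getLastD (0, 0) :: a.dropLast.reverse := gsReverse_split a hane
      have hsplit2 : dead ++ a.reverse = (dead ++ [a.getLastD (0, 0)]) ++ a.dropLast.reverse := by
        rw [hrs]; simp
      have hlen2 : ((dead ++ [a.getLastD (0, 0)]).length : Int) = (dead.length : Int) + 1 := by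
        simp
      have hfront2 : (PySem.List.pyGet? (dead ++ a.reverse) ((dead.length : Int) + 1)).getD (0, 0) =
          a.dropLast.getLastD (0, 0) := by
        rw [hsplit2, ← hlen2]
        have h0 : PySem.List.pyGet? ((dead ++ [a.getLastD (0, 0)]) ++ a.dropLast.reverse)
            (((dead ++ [a.getLastD (0, 0)]).length : Int) + ((0 : Nat) : Int)) =
            (a.dropLast.reverse)[0]? := PySem.List.pyGet?_append_right _ _ 0
        rw [show (((dead ++ [a.getLastD (0, 0)]).length : Int) + ((0 : Nat) : Int)) =
            ((dead ++ [a.getLastD (0, 0)]).length : Int) by simp] at h0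
        rw [h0, ← List.head?_eq_getElem?, List.head?_reverse, List.getLastD_eq_getLast?]
      simp only [hx, hpop, hdq, hfront dead, hev, if_true, ite_true]
      simp only [hfront2, hact1, hdead1, hsw1, hev, if_true, ite_true]
      simp only [Prod.mk.injEq]
      refine ⟨?_, ?_, ?_⟩
      · rw [hsplit2]
      · simp
      · simp only [gsVal, gsDVal]
        split_ifs with hc
        · rfl
        · simp
    · simp only [hx, hpop, hdq, hfront dead, hev, if_false, ite_false]
      simp only [hfront dead, hact1, hdead1, hsw1, hev, if_false, ite_false]
      simp only [Prod.mk.injEq]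
      refine ⟨?_, ?_, ?_⟩
      · simp
      · simp
      · simp only [gsVal, gsDVal]
        split_ifs with hc
        · rfl
        · simp

lemma gsDVal_nat (data : List Int) (m : Nat) (hm : m < data.length) :
    gsDVal data (m : Int) = data[m] := by
  rw [gsDVal, PySem.List.pyGet?_natCast, List.getElem?_eq_getElem hm, Option.getD_some]

lemma gsWin_mem (data : List Int) (lb i : Int) (hlb : 0 ≤ lb) (hi : lb ≤ i)
    (hin : i < (data.length : Int) - lb) :
    ∀ y : Int, y ∈ PySem.List.slice data (some (i - lb)) (some (i + lb + 1)) ↔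
      ∃ k : Int, i - lb ≤ k ∧ k < i + lb + 1 ∧ y = gsDVal data k := by
  have hA : (0 : Int) ≤ i - lb := by omega
  have hB : (0 : Int) ≤ i + lb + 1 := by omega
  rw [PySem.List.slice_toNat data hA hB]
  set A := (i - lb).toNat with hAd
  set B := (i + lb + 1).toNat with hBd
  have hAi : (A : Int) = i - lb := Int.toNat_of_nonneg hA
  have hBi : (B : Int) = i + lb + 1 := Int.toNat_of_nonneg hB
  have hBn : B ≤ data.length := by omega
  intro y
  constructor
  · intro hy
    obtain ⟨t, ht, hval⟩ := List.mem_iff_getElem.mp hy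
    have htlen : t < B - A := by
      have h0 := ht
      rw [List.length_take, List.length_drop] at h0
      omega
    have htA : A + t < data.length := by omega
    have hwt : (List.take (B - A) (List.drop A data))[t]'ht = data[A + t]'htA := by
      rw [List.getElem_take, List.getElem_drop]
    refine ⟨((A + t : Nat) : Int), by omega, by omega, ?_⟩
    rw [← hval, hwt, gsDVal_nat data (A + t) htA]
  · rintro ⟨k, hk1, hk2, rfl⟩
    have hk0 : (0 : Int) ≤ k := by omega
    have hkN : k.toNat < data.length := by omega
    have ht : k.toNat - A < (List.take (B - A) (List.drop A data)).length := by
      rw [List.length_take, List.length_drop]; omega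
    rw [List.mem_iff_getElem]
    refine ⟨k.toNat - A, ht, ?_⟩
    rw [List.getElem_take, List.getElem_drop]
    have hck : ((k.toNat : Nat) : Int) = k := Int.toNat_of_nonneg hk0
    have h1 : gsDVal data k = data[k.toNat] := by
      conv_lhs => rw [← hck]
      exact gsDVal_nat data k.toNat hkN
    rw [h1]
    simp only [show A + (k.toNat - A) = k.toNat from by omega]

-- A's per-index test agrees with gsCond
lemma gsCondA_high (data : List Int) (lb i : Int) (hlb : 0 ≤ lb) (hi : lb ≤ i)
    (hin : i < (data.length : Int) - lb) :
    (PySem.List.pyGet? data i =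
        PySem.List.max? (PySem.List.slice data (some (i - lb)) (some (i + lb + 1))) (fun y => y)) ↔
      gsCond 1 data lb i = true := by
  have hwin := gsWin_mem data lb i hlb hi hin
  have hiN : i.toNat < data.length := by omega
  have hdi : PySem.List.pyGet? data i = some data[i.toNat] :=
    PySem.List.pyGet?_eq_some_getElem data (by omega) (by omega)
  have hick : ((i.toNat : Nat) : Int) = i := Int.toNat_of_nonneg (by omega)
  have hdval : data[i.toNat] = gsDVal data i := by
    have := gsDVal_nat data i.toNat hiN
    rw [hick] at this
    exact this.symm
  have hmemwin : gsDVal data i ∈ PySem.List.slice data (some (i - lb)) (some (i + lb + 1)) :=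
    (hwin _).mpr ⟨i, by omega, by omega, rfl⟩
  constructor
  · intro h
    rw [gsCond, List.all_eq_true]
    intro k hk
    rw [PySem.List.mem_pyRange_one] at hk
    have hsome : PySem.List.max? (PySem.List.slice data (some (i - lb)) (some (i + lb + 1)))
        (fun y => y) = some (gsDVal data i) := by
      rw [← h, hdi, hdval]
    have hisMax := PySem.List.max?_isMax hsome
    have hkmem : gsDVal data k ∈ PySem.List.slice data (some (i - lb)) (some (i + lb + 1)) :=
      (hwin _).mpr ⟨k, by omega, by omega, rfl⟩
    have := hisMax _ hkmem
    simp only [gsVal, one_mul, decide_eq_true_eq]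
    exact this
  · intro hall
    rw [gsCond, List.all_eq_true] at hall
    have hyle : ∀ y ∈ PySem.List.slice data (some (i - lb)) (some (i + lb + 1)),
        y ≤ gsDVal data i := by
      intro y hy
      obtain ⟨k, hk1, hk2, rfl⟩ := (hwin y).mp hy
      have := hall k (by rw [PySem.List.mem_pyRange_one]; omega)
      simp only [gsVal, decide_eq_true_eq] at this
      omega
    rcases hmax : PySem.List.max? (PySem.List.slice data (some (i - lb)) (some (i + lb + 1)))
        (fun y => y) with _ | m
    · rw [PySem.List.max?_eq_none_iff] at hmax
      rw [hmax] at hmemwin; cases hmemwin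
    · have hmmem := PySem.List.max?_mem hmax
      have h1 : m ≤ gsDVal data i := hyle m hmmem
      have h2 : gsDVal data i ≤ m := PySem.List.max?_isMax hmax _ hmemwin
      rw [hdi, hdval]
      congr 1
      omega

lemma gsCondA_low (data : List Int) (lb i : Int) (hlb : 0 ≤ lb) (hi : lb ≤ i)
    (hin : i < (data.length : Int) - lb) :
    (PySem.List.pyGet? data i =
        PySem.List.min? (PySem.List.slice data (some (i - lb)) (some (i + lb + 1))) (fun y => y)) ↔
      gsCond (-1) data lb i = true := by
  have hwin := gsWin_mem data lb i hlb hi hin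
  have hiN : i.toNat < data.length := by omega
  have hdi : PySem.List.pyGet? data i = some data[i.toNat] :=
    PySem.List.pyGet?_eq_some_getElem data (by omega) (by omega)
  have hick : ((i.toNat : Nat) : Int) = i := Int.toNat_of_nonneg (by omega)
  have hdval : data[i.toNat] = gsDVal data i := by
    have := gsDVal_nat data i.toNat hiN
    rw [hick] at this
    exact this.symm
  have hmemwin : gsDVal data i ∈ PySem.List.slice data (some (i - lb)) (some (i + lb + 1)) :=
    (hwin _).mpr ⟨i, by omega, by omega, rfl⟩
  constructor
  · intro h
    rw [gsCond, List.all_eq_true]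
    intro k hk
    rw [PySem.List.mem_pyRange_one] at hk
    have hsome : PySem.List.min? (PySem.List.slice data (some (i - lb)) (some (i + lb + 1)))
        (fun y => y) = some (gsDVal data i) := by
      rw [← h, hdi, hdval]
    have hisMin := PySem.List.min?_isMin hsome
    have hkmem : gsDVal data k ∈ PySem.List.slice data (some (i - lb)) (some (i + lb + 1)) :=
      (hwin _).mpr ⟨k, by omega, by omega, rfl⟩
    have := hisMin _ hkmem
    simp only [gsVal, decide_eq_true_eq]
    omega
  · intro hall
    rw [gsCond, List.all_eq_true] at hall
    have hyle : ∀ y ∈ PySem.List.slice data (some (i - lb)) (some (i + lb + 1)),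
        gsDVal data i ≤ y := by
      intro y hy
      obtain ⟨k, hk1, hk2, rfl⟩ := (hwin y).mp hy
      have := hall k (by rw [PySem.List.mem_pyRange_one]; omega)
      simp only [gsVal, decide_eq_true_eq] at this
      omega
    rcases hmin : PySem.List.min? (PySem.List.slice data (some (i - lb)) (some (i + lb + 1)))
        (fun y => y) with _ | m
    · rw [PySem.List.min?_eq_none_iff] at hmin
      rw [hmin] at hmemwin; cases hmemwin
    · have hmmem := PySem.List.min?_mem hmin
      have h1 : gsDVal data i ≤ m := hyle m hmmem
      have h2 : m ≤ gsDVal data i := PySem.List.min?_isMin hmin _ hmemwin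
      rw [hdi, hdval]
      congr 1
      omega

lemma gsA_eq (data : List Int) (is_high : Bool) (lb : Int) (hlb : 0 ≤ lb) :
    get_swings data is_high lb =
      gsSpecList (if is_high then 1 else -1) data lb (data.length : Int) := by
  cases is_high
  case false =>
    rw [get_swings, gsSpecList]
    have hfun : (fun (swings : List (Int × Int)) (i : Int) =>
        if (false : Bool) then
          if PySem.List.pyGet? data i =
              PySem.List.max? (PySem.List.slice data (some (i - lb)) (some (i + lb + 1))) (fun y => y)
          then swings ++ [(i, (PySem.List.pyGet? data i).getD 0)] else swings
        else
          if PySem.List.pyGet? data i =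
              PySem.List.min? (PySem.List.slice data (some (i - lb)) (some (i + lb + 1))) (fun y => y)
          then swings ++ [(i, (PySem.List.pyGet? data i).getD 0)] else swings) =
        (fun swings i =>
          if (fun i => decide (PySem.List.pyGet? data i =
                PySem.List.min? (PySem.List.slice data (some (i - lb)) (some (i + lb + 1)))
                  (fun y => y))) i = true
          then swings ++ [(i, (PySem.List.pyGet? data i).getD 0)] else swings) := by
      funext s i
      simp
    rw [hfun, PySem.List.foldl_append_if, List.nil_append]
    simp only [gsDVal]
    congr 1
    apply List.filter_congr
    intro i hi
    rw [PySem.List.mem_pyRange_one] at hi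
    rw [Bool.eq_iff_iff, decide_eq_true_eq]
    exact gsCondA_low data lb i hlb hi.1 hi.2
  case true =>
    rw [get_swings, gsSpecList]
    have hfun : (fun (swings : List (Int × Int)) (i : Int) =>
        if (true : Bool) then
          if PySem.List.pyGet? data i =
              PySem.List.max? (PySem.List.slice data (some (i - lb)) (some (i + lb + 1))) (fun y => y)
          then swings ++ [(i, (PySem.List.pyGet? data i).getD 0)] else swings
        else
          if PySem.List.pyGet? data i =
              PySem.List.min? (PySem.List.slice data (some (i - lb)) (some (i + lb + 1))) (fun y => y)
          then swings ++ [(i, (PySem.List.pyGet? data i).getD 0)] else swings) =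
        (fun swings i =>
          if (fun i => decide (PySem.List.pyGet? data i =
                PySem.List.max? (PySem.List.slice data (some (i - lb)) (some (i + lb + 1)))
                  (fun y => y))) i = true
          then swings ++ [(i, (PySem.List.pyGet? data i).getD 0)] else swings) := by
      funext s i
      simp
    rw [hfun, PySem.List.foldl_append_if, List.nil_append]
    simp only [gsDVal]
    congr 1
    apply List.filter_congr
    intro i hi
    rw [PySem.List.mem_pyRange_one] at hi
    rw [Bool.eq_iff_iff, decide_eq_true_eq]
    exact gsCondA_high data lb i hlb hi.1 hi.2

lemma gsB_eq (data : List Int) (is_high : Bool) (lb : Int) (hlb : 0 ≤ lb)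
    (hn : 2 * lb + 1 ≤ (data.length : Int)) :
    get_swings_alt data is_high lb =
      gsSpecList (if is_high then 1 else -1) data lb (data.length : Int) := by
  have h1 : get_swings_alt data is_high lb =
      ((PySem.List.pyRange 0 ((data.length : Int))).foldl
        (fun (st : List (Int × Int) × Int × List (Int × Int)) j =>
          let x := (if is_high then (1 : Int) else -1) * ((PySem.List.pyGet? data j).getD 0)
          let dq := gsPopLoop x st.2.1 st.1 ++ [(j, x)]
          let head := if ((PySem.List.pyGet? dq st.2.1).getD (0, 0)).1 ≤ j - (2 * lb + 1)
            then st.2.1 + 1 else st.2.1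
          let i := j - lb
          let v := (PySem.List.pyGet? data i).getD 0
          let swings := if lb ≤ i ∧
              (if is_high then (1 : Int) else -1) * v = ((PySem.List.pyGet? dq head).getD (0, 0)).2
            then st.2.2 ++ [(i, v)] else st.2.2
          (dq, head, swings))
        ([], 0, [])).2.2 := by
    show (if lb < 0 ∨ ((data.length : Int)) < 2 * lb + 1 then ([] : List (Int × Int)) else _) = _
    rw [if_neg (by omega)]
  rw [h1, gsSim data (if is_high then (1 : Int) else -1) lb (2 * lb + 1) data.length]
  exact gsSw_eq (if is_high then (1 : Int) else -1) data lb hlb data.length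

-- ===== VERDICT (by name: the statement is the Claim_ definition above) =====
theorem get_swings_spec : Claim_equal_get_swings := by
  intro data is_high lb _ hpre
  unfold Spec_get_swings
  have hlb : 0 ≤ lb := hpre
  by_cases hn : (data.length : Int) < 2 * lb + 1
  · -- both results are empty: A's range is empty and B short-circuits
    rw [get_swings,
      show PySem.List.pyRange lb ((data.length : Int) - lb) = [] from gsRange_nil (by omega),
      List.foldl_nil]
    simp only [get_swings_alt]
    rw [if_pos (Or.inr (by omega))]
  · rw [gsA_eq data is_high lb hlb, gsB_eq data is_high lb hlb (le_of_not_gt hn)]
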